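-- pv_equiv track=rewrite | github.com/Koarra/rag_app | step6_extract_relationships.py | extract_entity_links
-- ===== SOURCE A (Python) =====
-- def extract_entity_links(entities_dict):
--     """Find which entities are mentioned in other entities' descriptions"""
--     entity_links = {}
--
--     for entity, description in entities_dict.items():
--         linked = []
--         for other_entity in entities_dict.keys():
--             if other_entity != entity and other_entity in description:
--                 linked.append(other_entity)
--         entity_links[entity] = linked
--
--     return entity_links
-- ===== SOURCE B (Python) =====
-- def extract_entity_links(entities_dict):
--     """Find which entities are mentioned in other entities' descriptions"""
--     names = list(entities_dict.keys())
--     # Multi-pattern scan: bucket names by first character, then scan each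
--     # description left to right once, probing only the names whose first
--     # character matches the current position; '' occurs in every description.
--     by_first = {}
--     empties = []
--     for name in names:
--         if name:
--             by_first.setdefault(name[0], []).append(name)
--         else:
--             empties.append(name)
--     entity_links = {}
--     for entity, description in entities_dict.items():
--         found = set(empties)
--         for i, ch in enumerate(description):
--             for name in by_first.get(ch, ()):
--                 if description.startswith(name, i):
--                     found.add(name)
--         entity_links[entity] = [n for n in names if n != entity and n in found]
--     return entity_links
-- ===== Notes on version B (the rewrite author's own statement) =====
-- stated objective: alternative
-- what changed: A substring-tests every name against every description (all-pairs 'in' checks); B builds a first-character index of the names once, scans each description left to right probing only the bucket of the current character (a simplified multi-pattern search), and emits each entity's matches by filtering the collected set back into key order.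
import Mathlib
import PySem

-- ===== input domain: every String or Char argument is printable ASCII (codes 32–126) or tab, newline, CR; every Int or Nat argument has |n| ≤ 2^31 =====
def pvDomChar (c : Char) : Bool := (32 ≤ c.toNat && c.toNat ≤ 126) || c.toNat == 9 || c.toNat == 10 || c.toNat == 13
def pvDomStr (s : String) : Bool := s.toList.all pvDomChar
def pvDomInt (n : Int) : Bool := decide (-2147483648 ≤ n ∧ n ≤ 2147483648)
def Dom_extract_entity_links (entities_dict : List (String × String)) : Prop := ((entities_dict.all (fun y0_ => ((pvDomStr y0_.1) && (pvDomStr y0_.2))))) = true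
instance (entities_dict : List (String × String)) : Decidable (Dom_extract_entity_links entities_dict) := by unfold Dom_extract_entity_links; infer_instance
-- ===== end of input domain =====

-- B replaces A's per-entity all-names substring scan by a multi-pattern search: names are
-- bucketed by first character once, each description is scanned left to right probing only
-- the bucket of the current character, and the result is filtered back into key order
-- (objective: alternative algorithm, same results).


-- ===== PORT A =====
def extract_entity_links (entities_dict : List (String × String)) : List (String × List String) :=
  let d := PySem.Dict.ofList entities_dict
  (d.items.foldl (fun links p =>
      links.insert p.1 (d.keys.foldl (fun linked o =>
        if o != p.1 && PySem.Str.isIn o p.2 then linked ++ [o] else linked) [])) PySem.Dict.empty).items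

-- ===== PORT B =====
def extract_entity_links_alt (entities_dict : List (String × String)) : List (String × List String) :=
  let d := PySem.Dict.ofList entities_dict
  let names := d.keys
  -- by_first / empties, built in one pass over names (the Python's setdefault+append = modify)
  let bf := names.foldl
      (fun (st : PySem.Dict Char (List String) × List String) name =>
        match name.toList with
        | c :: _ => (st.1.modify c [] (· ++ [name]), st.2)
        | [] => (st.1, st.2 ++ [name]))
      (PySem.Dict.empty, [])
  (d.items.foldl (fun links p =>
      let s := p.2.toList
      let found := (PySem.List.enumerate s 0).foldl
        (fun (found : PySem.Set String) ic =>
          (bf.1.getD ic.2 []).foldl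
            (fun found name =>
              -- description.startswith(name, i): exact here since 0 ≤ i < len(description)
              if PySem.Chars.startswith (s.drop ic.1.toNat) name.toList then PySem.Set.add found name
              else found) found)
        (PySem.Set.ofList bf.2)
      links.insert p.1 (names.filter (fun n => n != p.1 && PySem.Set.contains found n)))
    PySem.Dict.empty).items

-- ===== PRECONDITION & SPEC =====
def Spec_extract_entity_links (entities_dict : List (String × String)) (out : List (String × List String)) : Prop := out = extract_entity_links_alt entities_dict
instance (entities_dict : List (String × String)) (out : List (String × List String)) : Decidable (Spec_extract_entity_links entities_dict out) := by unfold Spec_extract_entity_links; infer_instance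

-- ===== CLAIM (what is proved, stated in full; the proofs are below) =====
def Claim_equal_extract_entity_links : Prop := ∀ (entities_dict : List (String × String)), Dom_extract_entity_links entities_dict → Spec_extract_entity_links entities_dict (extract_entity_links entities_dict)

-- ===== LEMMAS AND PROOFS =====

-- B's pair fold building (by_first, empties) splits into two independent folds
lemma pv_bf_split : ∀ (l : List String) (d : PySem.Dict Char (List String)) (e : List String),
    l.foldl (fun (st : PySem.Dict Char (List String) × List String) name =>
        match name.toList with
        | c :: _ => (st.1.modify c [] (· ++ [name]), st.2)
        | [] => (st.1, st.2 ++ [name])) (d, e)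
    = (l.foldl (fun d name =>
          match name.toList with
          | c :: _ => d.modify c [] (· ++ [name])
          | [] => d) d,
       l.foldl (fun e name =>
          match name.toList with
          | _ :: _ => e
          | [] => e ++ [name]) e) := by
  intro l
  induction l with
  | nil => intro d e; rfl
  | cons x xs ih =>
    intro d e
    cases h : x.toList <;> simp only [List.foldl_cons, h] <;> exact ih _ _

-- the 'empties' fold is the filter of the empty-string names
lemma pv_empties : ∀ (l : List String) (e : List String),
    l.foldl (fun e name =>
        match name.toList with
        | _ :: _ => e
        | [] => e ++ [name]) e
    = e ++ l.filter (fun n => n.toList.isEmpty) := by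
  intro l
  induction l with
  | nil => intro e; simp
  | cons x xs ih =>
    intro e
    cases h : x.toList <;> simp only [List.foldl_cons, h, List.filter_cons, List.isEmpty_nil,
      List.isEmpty_cons] <;> simp [ih, List.append_assoc]

-- membership in a bucket of the by_first fold
lemma pv_bucket_mem : ∀ (l : List String) (d : PySem.Dict Char (List String)) (c : Char) (x : String),
    x ∈ (l.foldl (fun d name =>
          match name.toList with
          | c' :: _ => d.modify c' [] (· ++ [name])
          | [] => d) d).getD c []
      ↔ x ∈ d.getD c [] ∨ (x ∈ l ∧ x.toList.head? = some c) := by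
  intro l
  induction l with
  | nil => intro d c x; simp
  | cons nm xs ih =>
    intro d c x
    cases h : nm.toList with
    | nil =>
      simp only [List.foldl_cons, h, ih, List.mem_cons]
      constructor
      · rintro (hd | ⟨hx, hh⟩)
        · exact Or.inl hd
        · exact Or.inr ⟨Or.inr hx, hh⟩
      · rintro (hd | ⟨hx | hx, hh⟩)
        · exact Or.inl hd
        · subst hx; rw [h] at hh; cases hh
        · exact Or.inr ⟨hx, hh⟩
    | cons c' t =>
      simp only [List.foldl_cons, h, ih, PySem.Dict.getD_modify, List.mem_cons]
      split_ifs with hc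
      · subst hc
        constructor
        · rintro (hd | ⟨hx, hh⟩)
          · rcases List.mem_append.mp hd with hd | hd
            · exact Or.inl hd
            · have hx := List.mem_singleton.mp hd
              exact Or.inr ⟨Or.inl hx, by simp [hx, h]⟩
          · exact Or.inr ⟨Or.inr hx, hh⟩
        · rintro (hd | ⟨hx | hx, hh⟩)
          · exact Or.inl (List.mem_append.mpr (Or.inl hd))
          · exact Or.inl (List.mem_append.mpr (Or.inr (List.mem_singleton.mpr hx)))
          · exact Or.inr ⟨hx, hh⟩
      · constructor
        · rintro (hd | ⟨hx, hh⟩)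
          · exact Or.inl hd
          · exact Or.inr ⟨Or.inr hx, hh⟩
        · rintro (hd | ⟨hx | hx, hh⟩)
          · exact Or.inl hd
          · exfalso
            rw [hx, h] at hh
            injection hh with hh'
            exact hc hh'.symm
          · exact Or.inr ⟨hx, hh⟩

-- membership after the guarded Set.add fold over one bucket
lemma pv_inner_mem : ∀ (b : List String) (cond : String → Bool) (f0 : PySem.Set String) (x : String),
    x ∈ b.foldl (fun f n => if cond n then PySem.Set.add f n else f) f0
      ↔ x ∈ f0 ∨ (x ∈ b ∧ cond x = true) := by
  intro b
  induction b with
  | nil => intro cond f0 x; simp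
  | cons n xs ih =>
    intro cond f0 x
    simp only [List.foldl_cons, List.mem_cons]
    by_cases h : cond n = true
    · rw [if_pos h, ih]
      constructor
      · rintro (hf | ⟨hx, hc⟩)
        · rcases (PySem.Set.mem_add _ _ _).mp hf with hf | hf
          · exact Or.inl hf
          · exact Or.inr ⟨Or.inl hf, hf ▸ h⟩
        · exact Or.inr ⟨Or.inr hx, hc⟩
      · rintro (hf | ⟨hx | hx, hc⟩)
        · exact Or.inl ((PySem.Set.mem_add _ _ _).mpr (Or.inl hf))
        · exact Or.inl ((PySem.Set.mem_add _ _ _).mpr (Or.inr hx))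
        · exact Or.inr ⟨hx, hc⟩
    · rw [if_neg h, ih]
      constructor
      · rintro (hf | ⟨hx, hc⟩)
        · exact Or.inl hf
        · exact Or.inr ⟨Or.inr hx, hc⟩
      · rintro (hf | ⟨hx | hx, hc⟩)
        · exact Or.inl hf
        · exact absurd (hx ▸ hc) h
        · exact Or.inr ⟨hx, hc⟩

-- membership after the whole scan
lemma pv_scan_mem {α : Type} : ∀ (l : List α) (bucket : α → List String) (cond : α → String → Bool)
    (f0 : PySem.Set String) (x : String),
    x ∈ l.foldl (fun f a => (bucket a).foldl (fun f n => if cond a n then PySem.Set.add f n else f) f) f0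
      ↔ x ∈ f0 ∨ ∃ a ∈ l, x ∈ bucket a ∧ cond a x = true := by
  intro l
  induction l with
  | nil => intro bucket cond f0 x; simp
  | cons a xs ih =>
    intro bucket cond f0 x
    simp only [List.foldl_cons, ih, pv_inner_mem, List.mem_cons]
    constructor
    · rintro ((hf | ⟨hb, hc⟩) | ⟨a', ha', hb, hc⟩)
      · exact Or.inl hf
      · exact Or.inr ⟨a, Or.inl rfl, hb, hc⟩
      · exact Or.inr ⟨a', Or.inr ha', hb, hc⟩
    · rintro (hf | ⟨a', ha' | ha', hb, hc⟩)
      · exact Or.inl (Or.inl hf)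
      · exact Or.inl (Or.inr ⟨ha' ▸ hb, ha' ▸ hc⟩)
      · exact Or.inr ⟨a', ha', hb, hc⟩

-- a nonempty pattern is a prefix of some suffix iff it is a prefix of a suffix starting
-- at a position holding its first character
lemma pv_pos_char (s : List Char) (c : Char) (t : List Char) :
    (∃ k : Nat, (∃ h : k < s.length, s[k] = c) ∧ (c :: t) <+: s.drop k)
      ↔ ∃ j : Nat, (c :: t) <+: s.drop j := by
  constructor
  · rintro ⟨k, _, hpre⟩; exact ⟨k, hpre⟩
  · rintro ⟨j, hpre⟩
    have hj : j < s.length := by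
      by_contra hge
      rw [List.drop_eq_nil_of_le (Nat.le_of_not_lt hge)] at hpre
      exact absurd (List.eq_nil_of_prefix_nil hpre) (by simp)
    refine ⟨j, ⟨hj, ?_⟩, hpre⟩
    obtain ⟨u, hu⟩ := hpre
    have hdrop := List.drop_eq_getElem_cons hj
    rw [← hu] at hdrop
    exact (List.cons.injEq _ _ _ _ ▸ hdrop).1.symm

-- the scanned set contains exactly the names occurring in the description
lemma pv_found (names : List String) (s : List Char) (n : String) (hn : n ∈ names) :
    n ∈ (PySem.List.enumerate s 0).foldl
        (fun (f : PySem.Set String) ic =>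
          (((names.foldl (fun d name =>
              match name.toList with
              | c' :: _ => d.modify c' [] (· ++ [name])
              | [] => d) PySem.Dict.empty)).getD ic.2 []).foldl
            (fun f name =>
              if PySem.Chars.startswith (s.drop ic.1.toNat) name.toList then PySem.Set.add f name
              else f) f)
        (PySem.Set.ofList (names.foldl (fun e name =>
            match name.toList with
            | _ :: _ => e
            | [] => e ++ [name]) []))
      ↔ PySem.Chars.isIn n.toList s = true := by
  rw [pv_scan_mem]
  rw [PySem.Set.mem_ofList, pv_empties, List.nil_append, List.mem_filter]
  cases hnl : n.toList with
  | nil =>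
    exact iff_of_true (Or.inl ⟨hn, rfl⟩) (PySem.Chars.isIn_nil s)
  | cons c t =>
    rw [← PySem.Chars.exists_prefix_drop_iff_isIn, ← pv_pos_char s c t]
    constructor
    · rintro (⟨_, hemp⟩ | ⟨ic, hic, hb, hc⟩)
      · exact absurd hemp (by simp)
      · rcases (PySem.List.mem_enumerate_iff _ _ _).mp hic with ⟨k, hk, hik⟩
        have hb' := (pv_bucket_mem names PySem.Dict.empty ic.2 n).mp hb
        rcases hb' with hb' | ⟨_, hh⟩
        · simp [PySem.Dict.getD_empty] at hb'
        · rw [hnl] at hh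
          have hic2 : ic.2 = c := by injection hh with h'; exact h'.symm
          have hic1 : ic.1.toNat = k := by rw [hik]; simp
          refine ⟨k, ⟨hk, ?_⟩, ?_⟩
          · rw [← hic2, hik]
          · rw [← hic1]
            exact (PySem.Chars.startswith_iff _ _).mp hc
    · rintro ⟨k, ⟨hk, hkc⟩, hpre⟩
      refine Or.inr ⟨((0 : Int) + (k : Int), c), ?_, ?_, ?_⟩
      · exact (PySem.List.mem_enumerate_iff _ _ _).mpr ⟨k, hk, by rw [hkc]⟩
      · exact (pv_bucket_mem names PySem.Dict.empty _ n).mpr (Or.inr ⟨hn, by simp [hnl]⟩)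
      · have h1 : ((0 : Int) + (k : Int)).toNat = k := by simp
        rw [h1]
        exact (PySem.Chars.startswith_iff _ _).mpr hpre

-- ===== VERDICT (by name: the statement is the Claim_ definition above) =====
theorem extract_entity_links_spec : Claim_equal_extract_entity_links := by
  intro ed _
  show extract_entity_links ed = extract_entity_links_alt ed
  simp only [extract_entity_links, extract_entity_links_alt]
  rw [pv_bf_split]
  set d := PySem.Dict.ofList ed with hd
  refine congrArg PySem.Dict.items ?_
  refine PySem.List.foldl_congr_mem _ _ _ _ ?_
  intro acc p hp
  refine congrArg (acc.insert p.1) ?_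
  rw [PySem.List.foldl_append_if_eq_filter, List.nil_append]
  refine List.filter_congr ?_
  intro n hn
  refine congrArg (fun b => (n != p.1) && b) ?_
  rw [Bool.eq_iff_iff, PySem.Str.isIn_eq, PySem.Set.contains_iff]
  exact (pv_found d.keys p.2.toList n hn).symm
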